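-- pv_equiv track=rewrite | github.com/roctbb/ai-game-engine | games/tic_tac_toe/examples/random_script.py | make_choice
-- ===== SOURCE A (Python) =====
-- def make_choice(field, role):
--     available_positions = []
--     for i in range(len(field)):
--         for j in range(len(field[0])):
--             if field[i][j] == 0:
--                 available_positions.append((i, j))
--
--     # Детерминированный pseudo-random без import: пользовательский рантайм
--     # специально не открывает внешние модули для демо-кодов.
--     seed = len(available_positions) * 7 + role * 3
--     return available_positions[seed % len(available_positions)]
-- ===== SOURCE B (Python) =====
-- def make_choice(field, role):
--     w = len(field[0])
--     count = 0
--     for row in field: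
--         for j in range(w):
--             if row[j] == 0:
--                 count += 1
--     idx = (count * 7 + role * 3) % count
--     for i, row in enumerate(field):
--         for j in range(w):
--             if row[j] == 0:
--                 if idx == 0:
--                     return (i, j)
--                 idx -= 1
-- ===== Notes on version B (the rewrite author's own statement) =====
-- stated objective: alternative
-- what changed: B never materialises the list of empty cells: a first pass only counts them, then a second pass re-scans the grid decrementing the index and returns the cell where it reaches zero (count-then-locate instead of collect-then-index).
import Mathlib
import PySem

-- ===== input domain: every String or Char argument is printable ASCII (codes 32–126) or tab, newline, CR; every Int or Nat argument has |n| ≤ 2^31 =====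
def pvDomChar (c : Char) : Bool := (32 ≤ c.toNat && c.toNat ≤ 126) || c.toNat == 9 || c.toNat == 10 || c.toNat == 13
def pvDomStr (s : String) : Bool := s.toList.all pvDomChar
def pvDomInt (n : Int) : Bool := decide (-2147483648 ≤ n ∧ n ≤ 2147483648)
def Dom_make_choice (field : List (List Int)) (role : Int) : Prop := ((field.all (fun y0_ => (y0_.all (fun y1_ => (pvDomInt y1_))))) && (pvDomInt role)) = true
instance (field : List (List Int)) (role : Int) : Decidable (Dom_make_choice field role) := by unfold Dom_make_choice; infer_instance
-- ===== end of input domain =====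

-- B's objective: same scan, but no materialised list of empty cells — count first, then locate.
-- Equivalence is about the RETURN value; neither version mutates its arguments.

-- ===== PORT A =====
-- literal transliteration of A: collect empty cells row-major, then index by (len*7+role*3) % len
def make_choice (field : List (List Int)) (role : Int) : Int × Int :=
  let w := (field.headD []).length
  let positions : List (Int × Int) :=
    (List.range field.length).foldl (fun acc i =>
      (List.range w).foldl (fun acc j =>
        if (field.getD i []).getD j 1 = 0 then acc ++ [((i : Int), (j : Int))] else acc) acc) []
  let seed : Int := (positions.length : Int) * 7 + role * 3
  (PySem.List.pyGet? positions (PySem.Int.mod seed (positions.length : Int))).getD (0, 0)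

-- ===== PORT B =====
-- first pass: count the zeros of one row over columns 0..w-1
def pvCountRow (w : Nat) (row : List Int) : Nat :=
  (List.range w).countP (fun j => row.getD j 1 = 0)

def pvCount (field : List (List Int)) (w : Nat) : Nat :=
  field.foldl (fun c row => c + pvCountRow w row) 0

-- second pass, inner loop: scan columns of one row, decrementing idx at zeros
def pvLocRow (row : List Int) (i : Nat) : List Nat → Int → Sum (Int × Int) Int
  | [], idx => .inr idx
  | j :: js, idx =>
    if row.getD j 1 = 0 then
      if idx = 0 then .inl ((i : Int), (j : Int)) else pvLocRow row i js (idx - 1)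
    else pvLocRow row i js idx

-- second pass, outer loop over enumerated rows ((0,0) is the unreachable fall-off default)
def pvLoc (w : Nat) : List (List Int) → Nat → Int → Int × Int
  | [], _, _ => (0, 0)
  | row :: rest, i, idx =>
    match pvLocRow row i (List.range w) idx with
    | .inl p => p
    | .inr idx' => pvLoc w rest (i + 1) idx'

def make_choice_alt (field : List (List Int)) (role : Int) : Int × Int :=
  let w := (field.headD []).length
  let count := pvCount field w
  let idx := PySem.Int.mod ((count : Int) * 7 + role * 3) (count : Int)
  pvLoc w field 0 idx

-- ===== PRECONDITION & SPEC =====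
-- Pre_ excludes exactly the inputs where the Python A raises: an empty field (IndexError on
-- field[0]), a row shorter than the first row (IndexError on field[i][j]), and a board with
-- no empty cell (ZeroDivisionError on seed % 0).
def Pre_make_choice (field : List (List Int)) (role : Int) : Prop :=
  field ≠ [] ∧ (∀ row ∈ field, (field.headD []).length ≤ row.length) ∧
  (field.any fun row => (List.range (field.headD []).length).any fun j => row.getD j 1 = 0) = true

instance (field : List (List Int)) (role : Int) : Decidable (Pre_make_choice field role) := by
  unfold Pre_make_choice; infer_instance

def pvWitness_make_choice : List (List Int) × Int := ([[1, 0], [0, 2]], 1)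

def Spec_make_choice (field : List (List Int)) (role : Int) (out : Int × Int) : Prop := out = make_choice_alt field role
instance (field : List (List Int)) (role : Int) (out : Int × Int) : Decidable (Spec_make_choice field role out) := by unfold Spec_make_choice; infer_instance

-- ===== CLAIM (what is proved, stated in full; the proofs are below) =====
def Claim_equal_make_choice : Prop := ∀ (field : List (List Int)) (role : Int), Dom_make_choice field role → Pre_make_choice field role → Spec_make_choice field role (make_choice field role)

-- ===== LEMMAS AND PROOFS =====

-- row-major list of the empty cells of one row (the common normal form of both sides)
def pvZrow (w : Nat) (i : Nat) (row : List Int) : List (Int × Int) :=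
  ((List.range w).filter (fun j => row.getD j 1 = 0)).map (fun (j : Nat) => ((i : Int), (j : Int)))

-- indexed flatten, the normal form of A's collected list
def pvG (w : Nat) : List (List Int) → Nat → List (Int × Int)
  | [], _ => []
  | row :: rest, i => pvZrow w i row ++ pvG w rest (i + 1)

-- generic decrement-indexing, the normal form of B's second pass
def pvPick {α : Type} : List α → Int → Sum α Int
  | [], idx => .inr idx
  | a :: as, idx => if idx = 0 then .inl a else pvPick as (idx - 1)

lemma pvLocRow_eq (row : List Int) (i : Nat) :
    ∀ (js : List Nat) (idx : Int),
      pvLocRow row i js idx =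
        pvPick ((js.filter (fun j => row.getD j 1 = 0)).map (fun (j : Nat) => ((i : Int), (j : Int)))) idx := by
  intro js
  induction js with
  | nil => intro idx; rfl
  | cons j js ih =>
    intro idx
    by_cases h : row.getD j 1 = 0
    · simp only [pvLocRow, if_pos h, List.filter_cons, if_pos (decide_eq_true h), List.map_cons,
        pvPick]
      by_cases h0 : idx = 0
      · simp [h0]
      · simp [h0, ih]
    · simp only [pvLocRow, if_neg h, List.filter_cons, if_neg (by simpa using h : ¬ decide (row.getD j 1 = 0) = true)]
      exact ih idx

lemma pvLocRow_eq_zrow (row : List Int) (i w : Nat) (idx : Int) :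
    pvLocRow row i (List.range w) idx = pvPick (pvZrow w i row) idx := by
  rw [pvLocRow_eq]; rfl

lemma pvPick_append {α : Type} (L1 L2 : List α) (idx : Int) :
    pvPick (L1 ++ L2) idx =
      (match pvPick L1 idx with | .inl a => .inl a | .inr r => pvPick L2 r) := by
  induction L1 generalizing idx with
  | nil => rfl
  | cons a as ih =>
    by_cases h0 : idx = 0 <;> simp [pvPick, h0, ih]

lemma pvLoc_eq (w : Nat) :
    ∀ (rows : List (List Int)) (i : Nat) (idx : Int),
      pvLoc w rows i idx =
        (match pvPick (pvG w rows i) idx with | .inl q => q | .inr _ => (0, 0)) := by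
  intro rows
  induction rows with
  | nil => intro i idx; rfl
  | cons row rest ih =>
    intro i idx
    simp only [pvLoc, pvLocRow_eq_zrow, pvG, pvPick_append]
    rcases h : pvPick (pvZrow w i row) idx with a | r
    · simp
    · simp [ih]

lemma pvPick_inl {α : Type} [Inhabited α] :
    ∀ (L : List α) (idx : Int), 0 ≤ idx → idx < L.length →
      pvPick L idx = .inl (L.getD idx.toNat default) := by
  intro L
  induction L with
  | nil => intro idx h1 h2; simp at h2; omega
  | cons a as ih =>
    intro idx h1 h2
    by_cases h0 : idx = 0
    · simp [pvPick, h0]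
    · have h1' : 1 ≤ idx := by omega
      have : idx.toNat = (idx - 1).toNat + 1 := by omega
      simp only [pvPick, if_neg h0, this, List.getD_cons_succ]
      exact ih (idx - 1) (by omega) (by simp at h2 ⊢; omega)

lemma pvCount_eq (w : Nat) (rows : List (List Int)) :
    pvCount rows w = (rows.map (pvCountRow w)).sum := by
  unfold pvCount
  rw [PySem.List.foldl_add_nat]
  simp

lemma pvG_length (w : Nat) : ∀ (rows : List (List Int)) (i : Nat),
    (pvG w rows i).length = pvCount rows w := by
  intro rows
  induction rows with
  | nil => intro i; rfl
  | cons row rest ih =>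
    intro i
    simp [pvG, pvZrow, ih, pvCount_eq, pvCountRow, List.countP_eq_length_filter]

-- generic indexed flatten, for the range-to-structural induction
def pvGgen (f : Nat → List Int → List (Int × Int)) : List (List Int) → Nat → List (Int × Int)
  | [], _ => []
  | r :: rest, i => f i r ++ pvGgen f rest (i + 1)

lemma pvGgen_shift (f : Nat → List Int → List (Int × Int)) :
    ∀ (rest : List (List Int)) (i : Nat), pvGgen f rest (i + 1) = pvGgen (fun k row => f (k + 1) row) rest i := by
  intro rest
  induction rest with
  | nil => intro i; rfl
  | cons r rs ih => intro i; simp [pvGgen, ih]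

lemma pvGgen_eq (w : Nat) : ∀ (rows : List (List Int)) (i : Nat),
    pvGgen (fun i row => pvZrow w i row) rows i = pvG w rows i := by
  intro rows
  induction rows with
  | nil => intro i; rfl
  | cons r rs ih => intro i; simp [pvGgen, pvG, ih]

-- A's collected list IS pvG w field 0
lemma pvA_positions (w : Nat) (field : List (List Int)) :
    (List.range field.length).foldl (fun acc i =>
      (List.range w).foldl (fun acc j =>
        if (field.getD i []).getD j 1 = 0 then acc ++ [((i : Int), (j : Int))] else acc) acc) []
    = pvG w field 0 := by
  have hinner : ∀ (acc : List (Int × Int)) (i : Nat),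
      (List.range w).foldl (fun acc j =>
        if (field.getD i []).getD j 1 = 0 then acc ++ [((i : Int), (j : Int))] else acc) acc
      = acc ++ pvZrow w i (field.getD i []) := by
    intro acc i
    simpa [pvZrow] using
      PySem.List.foldl_append_if (l := List.range w)
        (p := fun j => (field.getD i []).getD j 1 = 0)
        (f := fun j => ((i : Int), (j : Int))) (acc := acc)
  calc (List.range field.length).foldl (fun acc i =>
      (List.range w).foldl (fun acc j =>
        if (field.getD i []).getD j 1 = 0 then acc ++ [((i : Int), (j : Int))] else acc) acc) []
      = (List.range field.length).foldl
          (fun acc i => acc ++ pvZrow w i (field.getD i [])) [] := by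
        apply PySem.List.foldl_congr_mem
        intro acc i _; exact hinner acc i
    _ = (List.range field.length).flatMap (fun i => pvZrow w i (field.getD i [])) := by
        simpa using PySem.List.foldl_append_eq_flatMap
          (l := List.range field.length)
          (g := fun i => pvZrow w i (field.getD i [])) (acc := [])
    _ = pvG w field 0 := by
        suffices h : ∀ (rows : List (List Int)) (f : Nat → List Int → List (Int × Int)),
            (List.range rows.length).flatMap (fun k => f k (rows.getD k [])) =
              pvGgen f rows 0 by
          rw [h field (fun i row => pvZrow w i row)]
          exact pvGgen_eq w field 0
        intro rows
        induction rows with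
        | nil => intro f; rfl
        | cons r rest ih =>
          intro f
          simp only [List.length_cons, List.range_succ_eq_map, List.flatMap_cons,
            List.flatMap_map, List.getD_cons_zero, List.getD_cons_succ]
          rw [ih (fun k row => f (k + 1) row)]
          simp [pvGgen, pvGgen_shift]

-- count positivity ⇔ the `any` in Pre_
lemma pvCount_pos (w : Nat) (field : List (List Int))
    (h : (field.any fun row => (List.range w).any fun j => row.getD j 1 = 0) = true) :
    0 < pvCount field w := by
  rw [pvCount_eq]
  rcases List.any_eq_true.mp h with ⟨row, hrow, hany⟩
  rcases List.any_eq_true.mp hany with ⟨j, hj, hz⟩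
  have : 0 < pvCountRow w row := by
    rw [pvCountRow]
    exact List.countP_pos_iff.mpr ⟨j, hj, hz⟩
  calc 0 < pvCountRow w row := this
    _ ≤ (field.map (pvCountRow w)).sum := List.single_le_sum (by simp) _ (List.mem_map_of_mem hrow)

-- ===== VERDICT (by name: the statement is the Claim_ definition above) =====
theorem make_choice_spec : Claim_equal_make_choice := by
  intro field role _ hpre
  rcases hpre with ⟨hne, hrows, hany⟩
  unfold Spec_make_choice
  simp only [make_choice, make_choice_alt]
  rw [pvA_positions ((field.headD []).length) field]
  set w := (field.headD []).length with hw
  have hlen : (pvG w field 0).length = pvCount field w := pvG_length w field 0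
  have hpos : 0 < pvCount field w := pvCount_pos w field hany
  simp only [hlen]
  set c : Int := (pvCount field w : Int) with hc
  have hcpos : (0 : Int) < c := by rw [hc]; exact_mod_cast hpos
  set idx : Int := PySem.Int.mod (c * 7 + role * 3) c with hidx
  have hmod : idx = (c * 7 + role * 3) % c := by
    rw [hidx, PySem.Int.mod_eq_emod_of_pos]
    exact hcpos
  have h0 : 0 ≤ idx := by rw [hmod]; exact Int.emod_nonneg _ (by omega)
  have hlt : idx < c := by rw [hmod]; exact Int.emod_lt_of_pos _ hcpos
  have hltlen : idx < ((pvG w field 0).length : Int) := by rw [hlen]; exact_mod_cast hlt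
  rw [pvLoc_eq, pvPick_inl (pvG w field 0) idx h0 (by exact_mod_cast hltlen)]
  rw [PySem.List.pyGet?_of_nonneg _ h0]
  have hnat : idx.toNat < (pvG w field 0).length := by omega
  simp [List.getD_eq_getElem?_getD, List.getElem?_eq_getElem hnat]
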